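-- pv_equiv track=rewrite | github.com/Lee12369/Programmers | 2023-06-24/11.py | solution
-- ===== SOURCE A (Python) =====
-- from collections import defaultdict
--
-- def solution(genres, plays):
--     answer = []
--     N = len(genres)
--     dic = defaultdict(list)
--     max_dic = defaultdict(int)
--
--     for i in range(N):
--         dic[genres[i]].append((plays[i], i))
--         max_dic[genres[i]] += plays[i]
--
--     lst = list(max_dic.items())
--     lst.sort(key=lambda x: -x[1])
--
--     for key in dic.keys():
--         dic[key].sort(key=lambda x: -x[0])
--
--     for genre, _ in lst:
--         if len(dic[genre]) == 1:
--             answer.append(dic[genre][0][1])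
--         else:
--             answer.append(dic[genre][0][1])
--             answer.append(dic[genre][1][1])
--
--     return answer
-- ===== SOURCE B (Python) =====
-- def solution(genres, plays):
--     # One pass: per genre keep running total and the top-2 (play, index) pairs
--     # (higher play first; lower index wins ties), then sort only the genres.
--     info = {}  # genre -> [total, best (play, i), second (play, i) or None]
--     for i, (g, p) in enumerate(zip(genres, plays)):
--         rec = info.get(g)
--         if rec is None:
--             info[g] = [p, (p, i), None]
--         elif p > rec[1][0]:
--             rec[0] += p
--             rec[2] = rec[1]
--             rec[1] = (p, i)
--         elif rec[2] is None or p > rec[2][0]: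
--             rec[0] += p
--             rec[2] = (p, i)
--         else:
--             rec[0] += p
--     answer = []
--     for _, (_, best, second) in sorted(info.items(), key=lambda kv: -kv[1][0]):
--         answer.append(best[1])
--         if second is not None:
--             answer.append(second[1])
--     return answer
-- ===== Notes on version B (the rewrite author's own statement) =====
-- stated objective: faster
-- what changed: Instead of grouping all songs per genre and sorting every genre's full song list (O(N log N)), B makes one linear pass keeping only the running total and the top-2 (play, index) pairs per genre, and sorts only the G genres by total.
import Mathlib
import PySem

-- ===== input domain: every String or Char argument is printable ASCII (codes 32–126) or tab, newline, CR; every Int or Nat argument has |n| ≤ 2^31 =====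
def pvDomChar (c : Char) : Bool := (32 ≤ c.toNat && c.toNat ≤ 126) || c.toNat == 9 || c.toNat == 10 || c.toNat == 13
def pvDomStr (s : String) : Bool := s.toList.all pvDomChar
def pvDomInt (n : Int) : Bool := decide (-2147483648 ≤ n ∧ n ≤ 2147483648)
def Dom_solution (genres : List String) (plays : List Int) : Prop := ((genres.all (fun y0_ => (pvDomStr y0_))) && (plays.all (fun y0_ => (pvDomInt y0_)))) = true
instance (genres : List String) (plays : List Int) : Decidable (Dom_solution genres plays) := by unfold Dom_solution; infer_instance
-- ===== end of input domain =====

-- B replaces A's per-genre full sort with one linear pass keeping the running total and top-2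
-- (play, index) per genre; only the genres are sorted (objective: faster). Return values only;
-- neither program mutates its arguments.

-- ===== PORT A =====
def solution (genres : List String) (plays : List Int) : List Int :=
  let N : Int := PySem.List.len genres
  -- the one loop filling both dicts (dic, max_dic), ported as a fold with a pair state
  let st := (PySem.List.pyRange 0 N).foldl
      (fun (st : PySem.Dict String (List (Int × Int)) × PySem.Dict String Int) i =>
        (st.1.modify (PySem.List.pyGetD genres i "") [] (fun l => l ++ [(PySem.List.pyGetD plays i 0, i)]),
         st.2.modify (PySem.List.pyGetD genres i "") 0 (fun t => t + PySem.List.pyGetD plays i 0)))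
      (PySem.Dict.empty, PySem.Dict.empty)
  let lst := PySem.List.sorted st.2.items (fun x => -x.2) false
  let dic2 := st.1.keys.foldl
      (fun d k => d.modify k [] (fun l => PySem.List.sorted l (fun x => -x.1) false)) st.1
  lst.foldl (fun answer gp =>
    let l := dic2.getD gp.1 []
    if l.length == 1 then answer ++ [(PySem.List.pyGetD l 0 (0, 0)).2]
    else (answer ++ [(PySem.List.pyGetD l 0 (0, 0)).2]) ++ [(PySem.List.pyGetD l 1 (0, 0)).2]) []

-- ===== PORT B =====
-- one step of B's linear pass: per-genre (total, best (play,i), second (play,i) or none)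
def altStep (info : PySem.Dict String (Int × (Int × Int) × Option (Int × Int)))
    (q : Int × String × Int) : PySem.Dict String (Int × (Int × Int) × Option (Int × Int)) :=
  match info.get? q.2.1 with
  | none => info.insert q.2.1 (q.2.2, (q.2.2, q.1), none)
  | some s =>
    if q.2.2 > s.2.1.1 then info.insert q.2.1 (s.1 + q.2.2, (q.2.2, q.1), some s.2.1)
    else if (match s.2.2 with | none => true | some b => q.2.2 > b.1) then
      info.insert q.2.1 (s.1 + q.2.2, s.2.1, some (q.2.2, q.1))
    else info.insert q.2.1 (s.1 + q.2.2, s.2.1, s.2.2)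

def solution_alt (genres : List String) (plays : List Int) : List Int :=
  let info := (PySem.List.enumerate (genres.zip plays)).foldl altStep PySem.Dict.empty
  (PySem.List.sorted info.items (fun kv => -kv.2.1) false).foldl
    (fun answer kv =>
      let ans := answer ++ [kv.2.2.1.2]
      match kv.2.2.2 with
      | none => ans
      | some b => ans ++ [b.2]) []

-- ===== PRECONDITION & SPEC =====
-- Pre_ excludes only len(plays) < len(genres), where A raises IndexError at plays[i].
def Pre_solution (genres : List String) (plays : List Int) : Prop := genres.length ≤ plays.length
instance (genres : List String) (plays : List Int) : Decidable (Pre_solution genres plays) := by unfold Pre_solution; infer_instance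
def pvWitness_solution : List String × List Int := (["pop", "pop", "classic"], [10, 20, 5])

def Spec_solution (genres : List String) (plays : List Int) (out : List Int) : Prop := out = solution_alt genres plays
instance (genres : List String) (plays : List Int) (out : List Int) : Decidable (Spec_solution genres plays out) := by unfold Spec_solution; infer_instance

-- ===== CLAIM (what is proved, stated in full; the proofs are below) =====
def Claim_equal_solution : Prop := ∀ (genres : List String) (plays : List Int), Dom_solution genres plays → Pre_solution genres plays → Spec_solution genres plays (solution genres plays)

-- ===== LEMMAS AND PROOFS =====

-- the indexed song list both programs traverse: (index, genre, plays)
def pvPairs (genres : List String) (plays : List Int) : List (Int × String × Int) :=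
  PySem.List.enumerate (genres.zip plays)
-- a genre's (play, index) pairs in index order
def pvL (l : List (Int × String × Int)) (g : String) : List (Int × Int) :=
  (l.filter (fun q => q.2.1 == g)).map (fun q => (q.2.2, q.1))
-- a genre's total plays
def pvT (l : List (Int × String × Int)) (g : String) : Int :=
  ((pvL l g).map (fun x => x.1)).sum
-- the genres in first-appearance order
def pvK (l : List (Int × String × Int)) : List String :=
  PySem.Set.ofList (l.map (fun q => q.2.1))
-- the genres in output order
def pvS (l : List (Int × String × Int)) : List String :=
  PySem.List.sorted (pvK l) (fun g => -pvT l g) false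
-- the one-or-two song indices emitted for a genre
def pvEmit (l : List (Int × String × Int)) (g : String) : List Int :=
  let m := PySem.List.sorted (pvL l g) (fun x => -x.1) false
  if m.length == 1 then [(PySem.List.pyGetD m 0 (0, 0)).2]
  else [(PySem.List.pyGetD m 0 (0, 0)).2, (PySem.List.pyGetD m 1 (0, 0)).2]
-- B's per-genre pure state machine
def pvStart (x : Int × Int) : Int × (Int × Int) × Option (Int × Int) := (x.1, x, none)
def pvBstep (s : Int × (Int × Int) × Option (Int × Int)) (x : Int × Int) :
    Int × (Int × Int) × Option (Int × Int) :=
  if x.1 > s.2.1.1 then (s.1 + x.1, (x.1, x.2), some s.2.1)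
  else if (match s.2.2 with | none => true | some b => x.1 > b.1) then (s.1 + x.1, s.2.1, some (x.1, x.2))
  else (s.1 + x.1, s.2.1, s.2.2)

theorem pv_loop_pairs {σ : Type} (genres : List String) (plays : List Int)
    (h : genres.length ≤ plays.length) (F : σ → Int × String × Int → σ) (init : σ) :
    (PySem.List.pyRange 0 (PySem.List.len genres)).foldl
      (fun s i => F s (i, PySem.List.pyGetD genres i "", PySem.List.pyGetD plays i 0)) init
    = (pvPairs genres plays).foldl F init := by
  unfold pvPairs
  rw [PySem.List.enumerate_eq_map_pyRange (genres.zip plays) ("", 0), List.foldl_map]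
  have hlen : PySem.List.len (genres.zip plays) = PySem.List.len genres := by
    simp [PySem.List.len_eq, List.length_zip, Nat.min_eq_left h]
  rw [hlen]
  apply PySem.List.foldl_congr_mem
  intro acc i hi
  rw [PySem.List.mem_pyRange_one] at hi
  have h0 : (0:Int) ≤ i := hi.1
  have h1g : i < (genres.length : Int) := by simpa [PySem.List.len_eq] using hi.2
  have h1z : i < ((genres.zip plays).length : Int) := by
    simp [List.length_zip, Nat.min_eq_left h]; exact_mod_cast h1g
  have h1p : i < (plays.length : Int) := by
    have hp : (genres.length : Int) ≤ (plays.length : Int) := by exact_mod_cast h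
    omega
  rw [PySem.List.pyGetD_eq_getElem _ _ h0 h1z, PySem.List.pyGetD_eq_getElem _ _ h0 h1g,
      PySem.List.pyGetD_eq_getElem _ _ h0 h1p]
  simp [List.getElem_zip]

theorem pv_getD_modify_sum (l : List (Int × String × Int)) (d : PySem.Dict String Int) (g : String) :
    (l.foldl (fun d q => d.modify q.2.1 0 (fun t => t + q.2.2)) d).getD g 0
      = d.getD g 0 + ((l.filter (fun q => q.2.1 == g)).map (fun q => q.2.2)).sum := by
  induction l generalizing d with
  | nil => simp
  | cons q l ih =>
    simp only [List.foldl_cons, ih, List.filter_cons]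
    by_cases h : q.2.1 = g
    · simp [h]
      ring
    · simp [h, PySem.Dict.getD_modify, Ne.symm h]

theorem pv_getD_modify_append (l : List (Int × String × Int))
    (d : PySem.Dict String (List (Int × Int))) (g : String) :
    (l.foldl (fun d q => d.modify q.2.1 [] (fun v => v ++ [(q.2.2, q.1)])) d).getD g []
      = d.getD g [] ++ pvL l g := by
  have h := PySem.Dict.getD_foldl_modify_append (l.map (fun q => (q.2.1, (q.2.2, q.1)))) d g
  rw [List.foldl_map] at h
  simp only [pvL]
  rw [h, List.filter_map, List.map_map]
  rfl

theorem pv_keys_modify_fold {ν : Type} (f : Int × String × Int → ν → ν) (dflt : ν) :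
    ∀ (l : List (Int × String × Int)) (d : PySem.Dict String ν),
      (l.foldl (fun d q => d.modify q.2.1 dflt (f q)) d).keys
        = PySem.Set.update d.keys (l.map (fun q => q.2.1)) := by
  intro l
  induction l with
  | nil => intro d; simp [PySem.Set.update_nil]
  | cons q l ih =>
    intro d
    simp only [List.foldl_cons, List.map_cons, PySem.Set.update_cons, ih]
    congr 1
    rw [PySem.Dict.keys_modify]
    by_cases h : d.contains q.2.1
    · rw [PySem.Dict.keys_insert_of_contains d _ h]
      have hm : q.2.1 ∈ d.keys := (PySem.Dict.contains_iff_mem_keys d _).mp h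
      simp [PySem.Set.add, hm]
    · rw [PySem.Dict.keys_insert_of_not_contains d _ (by simpa using h)]
      have hm : q.2.1 ∉ d.keys := fun hm => h ((PySem.Dict.contains_iff_mem_keys d _).mpr hm)
      simp [PySem.Set.add, hm]

theorem pv_altStep_insert (d : PySem.Dict String (Int × (Int × Int) × Option (Int × Int)))
    (q : Int × String × Int) : ∃ v, altStep d q = d.insert q.2.1 v := by
  unfold altStep
  rcases h : d.get? q.2.1 with _ | s
  · exact ⟨_, rfl⟩
  · dsimp only
    split_ifs <;> exact ⟨_, rfl⟩

theorem pv_keys_altStep_fold :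
    ∀ (l : List (Int × String × Int)) (d : PySem.Dict String (Int × (Int × Int) × Option (Int × Int))),
      (l.foldl altStep d).keys = PySem.Set.update d.keys (l.map (fun q => q.2.1)) := by
  intro l
  induction l with
  | nil => intro d; simp [PySem.Set.update_nil]
  | cons q l ih =>
    intro d
    simp only [List.foldl_cons, List.map_cons, PySem.Set.update_cons, ih]
    congr 1
    obtain ⟨v, hv⟩ := pv_altStep_insert d q
    rw [hv]
    by_cases h : d.contains q.2.1
    · rw [PySem.Dict.keys_insert_of_contains d _ h]
      have hm : q.2.1 ∈ d.keys := (PySem.Dict.contains_iff_mem_keys d _).mp h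
      simp [PySem.Set.add, hm]
    · rw [PySem.Dict.keys_insert_of_not_contains d _ (by simpa using h)]
      have hm : q.2.1 ∉ d.keys := fun hm => h ((PySem.Dict.contains_iff_mem_keys d _).mpr hm)
      simp [PySem.Set.add, hm]

theorem pv_get?_altStep_fold :
    ∀ (l : List (Int × String × Int)) (d : PySem.Dict String (Int × (Int × Int) × Option (Int × Int))) (g : String),
      (l.foldl altStep d).get? g
        = match d.get? g with
          | none => (match pvL l g with
                     | [] => none
                     | x :: r => some (r.foldl pvBstep (pvStart x)))
          | some s => some ((pvL l g).foldl pvBstep s) := by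
  intro l
  induction l with
  | nil => intro d g; cases h : d.get? g <;> simp [pvL, h]
  | cons q l ih =>
    intro d g
    simp only [List.foldl_cons]
    rw [ih]
    by_cases hg : g = q.2.1
    · subst hg
      have hL : pvL (q :: l) q.2.1 = (q.2.2, q.1) :: pvL l q.2.1 := by simp [pvL]
      rcases hd : d.get? q.2.1 with _ | s
      · -- new key: altStep inserts the start state
        have hst : (altStep d q).get? q.2.1 = some (pvStart (q.2.2, q.1)) := by
          unfold altStep; rw [hd]; simp [PySem.Dict.get?_insert_self, pvStart]
        rw [hst, hL]
      · have hst : (altStep d q).get? q.2.1 = some (pvBstep s (q.2.2, q.1)) := by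
          unfold altStep; rw [hd]; unfold pvBstep
          dsimp only
          split_ifs <;> simp [PySem.Dict.get?_insert_self]
        rw [hst, hL]
        simp
    · have hL : pvL (q :: l) g = pvL l g := by
        simp only [pvL, List.filter_cons]
        rw [if_neg (by simpa using fun h => hg (by simp [h]))]
      have hst : (altStep d q).get? g = d.get? g := by
        obtain ⟨v, hv⟩ := pv_altStep_insert d q
        rw [hv, PySem.Dict.get?_insert_of_ne d v hg]
      rw [hst, hL]

theorem pv_fst_bstep : ∀ (r : List (Int × Int)) (s : Int × (Int × Int) × Option (Int × Int)),
    (r.foldl pvBstep s).1 = s.1 + (r.map (fun x => x.1)).sum := by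
  intro r
  induction r with
  | nil => simp
  | cons x r ih =>
    intro s
    simp only [List.foldl_cons, ih, List.map_cons, List.sum_cons]
    unfold pvBstep
    split_ifs <;> simp <;> ring

def pvIb (y : Int × Int) (acc : List (Int × Int)) : List (Int × Int) :=
  PySem.List.insertBy (fun a b => decide ((fun p : Int × Int => -p.1) a < (fun p : Int × Int => -p.1) b)) y acc

theorem pv_ib_ne_nil (y : Int × Int) (acc : List (Int × Int)) : pvIb y acc ≠ [] := by
  cases acc <;> simp [pvIb, PySem.List.insertBy] <;> split_ifs <;> simp

theorem pv_bstep_ib (acc : List (Int × Int)) (s : Int × (Int × Int) × Option (Int × Int))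
    (y : Int × Int) (hne : acc ≠ []) (h1 : s.2.1 = acc.head?.getD (0, 0)) (h2 : s.2.2 = acc[1]?) :
    (pvBstep s y).2.1 = (pvIb y acc).head?.getD (0, 0) ∧ (pvBstep s y).2.2 = (pvIb y acc)[1]? := by
  match acc with
  | [] => exact absurd rfl hne
  | a0 :: rest =>
    simp only [List.head?_cons, Option.getD_some] at h1
    match rest with
    | [] =>
      simp only [List.getElem?_cons_succ, List.getElem?_nil] at h2
      by_cases hc : y.1 > a0.1
      · simp [pvBstep, pvIb, PySem.List.insertBy, h1, hc, show ((-y.1:Int) < -a0.1) from by omega]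
      · simp [pvBstep, pvIb, PySem.List.insertBy, h1, h2, hc, show ¬ ((-y.1:Int) < -a0.1) from by omega]
    | a1 :: rest' =>
      simp only [List.getElem?_cons_succ, List.getElem?_cons_zero] at h2
      by_cases hc : y.1 > a0.1
      · simp [pvBstep, pvIb, PySem.List.insertBy, h1, hc, show ((-y.1:Int) < -a0.1) from by omega]
      · by_cases hc2 : y.1 > a1.1
        · simp [pvBstep, pvIb, PySem.List.insertBy, h1, h2, hc, hc2,
                show ¬ ((-y.1:Int) < -a0.1) from by omega, show ((-y.1:Int) < -a1.1) from by omega]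
        · simp [pvBstep, pvIb, PySem.List.insertBy, h1, h2, hc, hc2,
                show ¬ ((-y.1:Int) < -a0.1) from by omega, show ¬ ((-y.1:Int) < -a1.1) from by omega]

theorem pv_foldl_bstep_inv : ∀ (r : List (Int × Int)) (s : Int × (Int × Int) × Option (Int × Int))
    (acc : List (Int × Int)), acc ≠ [] → s.2.1 = acc.head?.getD (0, 0) → s.2.2 = acc[1]? →
    (r.foldl pvBstep s).2.1 = (r.foldl (fun acc y => pvIb y acc) acc).head?.getD (0, 0)
      ∧ (r.foldl pvBstep s).2.2 = (r.foldl (fun acc y => pvIb y acc) acc)[1]? := by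
  intro r
  induction r with
  | nil => intro s acc _ h1 h2; exact ⟨h1, h2⟩
  | cons y r ih =>
    intro s acc hne h1 h2
    simp only [List.foldl_cons]
    obtain ⟨g1, g2⟩ := pv_bstep_ib acc s y hne h1 h2
    exact ih _ _ (pv_ib_ne_nil y acc) g1 g2

theorem pv_top2_sorted (x : Int × Int) (r : List (Int × Int)) :
    (r.foldl pvBstep (pvStart x)).2.1
        = (PySem.List.sorted (x :: r) (fun p => -p.1) false).head?.getD (0, 0)
      ∧ (r.foldl pvBstep (pvStart x)).2.2
        = (PySem.List.sorted (x :: r) (fun p => -p.1) false)[1]? := by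
  rw [PySem.List.sorted_eq_foldl_insertBy]
  simp only [List.foldl_cons]
  have hax : PySem.List.insertBy (fun a b => decide ((fun p : Int × Int => -p.1) a < (fun p : Int × Int => -p.1) b)) x [] = [x] := rfl
  rw [hax]
  exact pv_foldl_bstep_inv r (pvStart x) [x] (by simp) rfl rfl

theorem pv_items_eq_keys_map {ν : Type} (d : PySem.Dict String ν) (dflt : ν) (h : d.keys.Nodup) :
    d.items = d.keys.map (fun k => (k, d.getD k dflt)) := by
  have hk : d.keys = d.items.map (fun p => p.1) := rfl
  rw [hk, List.map_map]
  have hcg : ∀ p ∈ d.items, ((fun k => (k, d.getD k dflt)) ∘ fun p => p.1) p = p := by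
    intro p hp
    have : d.getD p.1 dflt = p.2 := by
      apply PySem.Dict.getD_of_mem_items (d := d) _ h
      simpa using hp
    simp [this]
  rw [List.map_congr_left hcg]
  simp

theorem pv_insertBy_map {α β : Type} (f : α → β) (key : β → Int) (x : α) :
    ∀ (ys : List α),
      PySem.List.insertBy (fun a b => decide (key a < key b)) (f x) (ys.map f)
        = (PySem.List.insertBy (fun a b => decide (key (f a) < key (f b))) x ys).map f := by
  intro ys
  induction ys with
  | nil => simp [PySem.List.insertBy]
  | cons y ys ih =>
    simp only [List.map_cons, PySem.List.insertBy]
    by_cases h : key (f x) < key (f y) <;> simp [h, ih]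

theorem pv_sorted_map_comm {α β : Type} (f : α → β) (key : β → Int) (xs : List α) :
    PySem.List.sorted (xs.map f) key false
      = (PySem.List.sorted xs (fun a => key (f a)) false).map f := by
  rw [PySem.List.sorted_eq_foldl_insertBy, PySem.List.sorted_eq_foldl_insertBy, List.foldl_map]
  have hmain : ∀ (xs : List α) (ys : List α),
      xs.foldl (fun acc x => PySem.List.insertBy (fun a b => decide (key a < key b)) (f x) acc) (ys.map f)
        = (xs.foldl (fun acc x => PySem.List.insertBy (fun a b => decide (key (f a) < key (f b))) x acc) ys).map f := by
    intro xs
    induction xs with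
    | nil => simp
    | cons x xs ih => intro ys; simp only [List.foldl_cons, pv_insertBy_map, ih]
  simpa using hmain xs []

theorem pv_dic2_getD (ks : List String) (f : List (Int × Int) → List (Int × Int)) :
    ∀ (d : PySem.Dict String (List (Int × Int))) (g : String), ks.Nodup →
      (ks.foldl (fun d k => d.modify k [] f) d).getD g []
        = if g ∈ ks then f (d.getD g []) else d.getD g [] := by
  induction ks with
  | nil => intro d g _; simp
  | cons k ks ih =>
    intro d g hnd
    rw [List.nodup_cons] at hnd
    simp only [List.foldl_cons]
    rw [ih _ _ hnd.2]
    by_cases hg : g = k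
    · subst hg
      rw [if_neg hnd.1, PySem.Dict.getD_modify]
      simp
    · rw [PySem.Dict.getD_modify]
      simp [hg, List.mem_cons]

theorem pv_mem_K_ne_nil (l : List (Int × String × Int)) (g : String) (hg : g ∈ pvK l) :
    ∃ x r, pvL l g = x :: r := by
  rw [pvK, PySem.Set.mem_ofList, List.mem_map] at hg
  obtain ⟨q, hq, hqg⟩ := hg
  have : pvL l g ≠ [] := by
    simp only [pvL, ne_eq, List.map_eq_nil_iff, List.filter_eq_nil_iff]
    intro hall
    exact absurd (by simp [hqg]) (hall q hq)
  exact List.exists_cons_of_ne_nil this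

-- A's output once its dictionaries are characterised
theorem pvA_canon (l : List (Int × String × Int)) (maxP : PySem.Dict String Int)
    (dic2 : PySem.Dict String (List (Int × Int)))
    (hitems : maxP.items = (pvK l).map (fun g => (g, pvT l g)))
    (hd : ∀ g ∈ pvK l, dic2.getD g [] = PySem.List.sorted (pvL l g) (fun x => -x.1) false) :
    (PySem.List.sorted maxP.items (fun x => -x.2) false).foldl
      (fun answer gp =>
        if (dic2.getD gp.1 []).length == 1 then answer ++ [(PySem.List.pyGetD (dic2.getD gp.1 []) 0 (0, 0)).2]
        else (answer ++ [(PySem.List.pyGetD (dic2.getD gp.1 []) 0 (0, 0)).2])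
              ++ [(PySem.List.pyGetD (dic2.getD gp.1 []) 1 (0, 0)).2]) []
      = (pvS l).flatMap (pvEmit l) := by
  rw [hitems, pv_sorted_map_comm (fun g => (g, pvT l g)) (fun x : String × Int => -x.2) (pvK l)]
  rw [List.foldl_map]
  have hbody : ∀ (acc : List Int), ∀ g ∈ PySem.List.sorted (pvK l) (fun a => -(pvT l a)) false,
      (if (dic2.getD g []).length == 1 then acc ++ [(PySem.List.pyGetD (dic2.getD g []) 0 (0, 0)).2]
       else (acc ++ [(PySem.List.pyGetD (dic2.getD g []) 0 (0, 0)).2])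
             ++ [(PySem.List.pyGetD (dic2.getD g []) 1 (0, 0)).2])
        = acc ++ pvEmit l g := by
    intro acc g hg
    have hk : g ∈ pvK l := (PySem.List.mem_sorted _ _ _ _).mp hg
    rw [hd g hk]
    unfold pvEmit
    simp only [PySem.List.length_sorted]
    split_ifs <;> simp [List.append_assoc]
  calc (PySem.List.sorted (pvK l) (fun a => -(pvT l a)) false).foldl
        (fun answer g =>
          if (dic2.getD g []).length == 1 then answer ++ [(PySem.List.pyGetD (dic2.getD g []) 0 (0, 0)).2]
          else (answer ++ [(PySem.List.pyGetD (dic2.getD g []) 0 (0, 0)).2])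
                ++ [(PySem.List.pyGetD (dic2.getD g []) 1 (0, 0)).2]) []
      = (PySem.List.sorted (pvK l) (fun a => -(pvT l a)) false).foldl
          (fun acc g => acc ++ pvEmit l g) [] := by
        apply PySem.List.foldl_congr_mem
        intro acc g hg
        exact hbody acc g hg
    _ = (pvS l).flatMap (pvEmit l) := by
        rw [PySem.List.foldl_append_eq_flatMap]
        simp [pvS]

-- B's output once its dictionary is characterised
theorem pvB_canon (l : List (Int × String × Int))
    (infoP : PySem.Dict String (Int × (Int × Int) × Option (Int × Int)))
    (hitems : infoP.items = (pvK l).map (fun g => (g, infoP.getD g (0, (0, 0), none))))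
    (hfst : ∀ g, (infoP.getD g (0, (0, 0), none)).1 = pvT l g)
    (hget : ∀ g ∈ pvK l, ∃ x r, pvL l g = x :: r ∧
        infoP.getD g (0, (0, 0), none) = r.foldl pvBstep (pvStart x)) :
    (PySem.List.sorted infoP.items (fun kv => -kv.2.1) false).foldl
      (fun answer kv =>
        match kv.2.2.2 with
        | none => answer ++ [kv.2.2.1.2]
        | some b => (answer ++ [kv.2.2.1.2]) ++ [b.2]) []
      = (pvS l).flatMap (pvEmit l) := by
  rw [hitems, pv_sorted_map_comm (fun g => (g, infoP.getD g (0, (0, 0), none)))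
        (fun kv : String × (Int × (Int × Int) × Option (Int × Int)) => -kv.2.1) (pvK l)]
  have hkey : (fun a => -(infoP.getD a (0, (0, 0), none)).1) = (fun g => -(pvT l g)) :=
    funext fun g => by rw [hfst g]
  rw [show (fun a => -((fun g => (g, infoP.getD g (0, (0, 0), none))) a).2.1)
        = (fun g : String => -(pvT l g)) from hkey]
  rw [List.foldl_map]
  have hbody : ∀ (acc : List Int), ∀ g ∈ PySem.List.sorted (pvK l) (fun a => -(pvT l a)) false,
      (match (infoP.getD g (0, (0, 0), none)).2.2 with
       | none => acc ++ [(infoP.getD g (0, (0, 0), none)).2.1.2]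
       | some b => (acc ++ [(infoP.getD g (0, (0, 0), none)).2.1.2]) ++ [b.2])
        = acc ++ pvEmit l g := by
    intro acc g hg
    have hk : g ∈ pvK l := (PySem.List.mem_sorted _ _ _ _).mp hg
    obtain ⟨x, r, hL, hv⟩ := hget g hk
    obtain ⟨h1, h2⟩ := pv_top2_sorted x r
    rw [hv, h1, h2, ← hL]
    unfold pvEmit
    have hlen : (PySem.List.sorted (pvL l g) (fun x => -x.1) false).length = r.length + 1 := by
      rw [PySem.List.length_sorted, hL]; simp
    rcases hm : PySem.List.sorted (pvL l g) (fun x => -x.1) false with _ | ⟨c, t⟩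
    · rw [hm] at hlen; simp at hlen
    · rcases t with _ | ⟨c2, t'⟩
      · simp [PySem.List.pyGetD_zero]
      · have : ¬ ((c :: c2 :: t').length == 1) = true := by simp
        rw [if_neg this]
        rw [PySem.List.pyGetD_ofNat' (c :: c2 :: t') 1 (0, 0)]
        simp [PySem.List.pyGetD_zero, List.append_assoc]
  calc (PySem.List.sorted (pvK l) (fun a => -(pvT l a)) false).foldl
        (fun answer g =>
          match (infoP.getD g (0, (0, 0), none)).2.2 with
          | none => answer ++ [(infoP.getD g (0, (0, 0), none)).2.1.2]
          | some b => (answer ++ [(infoP.getD g (0, (0, 0), none)).2.1.2]) ++ [b.2]) []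
      = (PySem.List.sorted (pvK l) (fun a => -(pvT l a)) false).foldl
          (fun acc g => acc ++ pvEmit l g) [] := by
        apply PySem.List.foldl_congr_mem
        intro acc g hg
        exact hbody acc g hg
    _ = (pvS l).flatMap (pvEmit l) := by
        rw [PySem.List.foldl_append_eq_flatMap]
        simp [pvS]

-- the port-A loop with its pair state, converted to folds over pvPairs
theorem pv_loopA (genres : List String) (plays : List Int) (h : genres.length ≤ plays.length) :
    (PySem.List.pyRange 0 (PySem.List.len genres)).foldl
      (fun (st : PySem.Dict String (List (Int × Int)) × PySem.Dict String Int) i =>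
        (st.1.modify (PySem.List.pyGetD genres i "") [] (fun l => l ++ [(PySem.List.pyGetD plays i 0, i)]),
         st.2.modify (PySem.List.pyGetD genres i "") 0 (fun t => t + PySem.List.pyGetD plays i 0)))
      (PySem.Dict.empty, PySem.Dict.empty)
    = ((pvPairs genres plays).foldl
        (fun d q => d.modify q.2.1 [] (fun v => v ++ [(q.2.2, q.1)])) PySem.Dict.empty,
       (pvPairs genres plays).foldl
        (fun d q => d.modify q.2.1 0 (fun t => t + q.2.2)) PySem.Dict.empty) := by
  have h0 := PySem.List.foldl_prod_mk
    (fun (d : PySem.Dict String (List (Int × Int))) i =>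
      d.modify (PySem.List.pyGetD genres i "") [] (fun l => l ++ [(PySem.List.pyGetD plays i 0, i)]))
    (fun (d : PySem.Dict String Int) i =>
      d.modify (PySem.List.pyGetD genres i "") 0 (fun t => t + PySem.List.pyGetD plays i 0))
    (PySem.List.pyRange 0 (PySem.List.len genres)) PySem.Dict.empty PySem.Dict.empty
  refine h0.trans ?_
  have hA1 : (PySem.List.pyRange 0 (PySem.List.len genres)).foldl
      (fun (d : PySem.Dict String (List (Int × Int))) i =>
        d.modify (PySem.List.pyGetD genres i "") [] (fun l => l ++ [(PySem.List.pyGetD plays i 0, i)]))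
      PySem.Dict.empty
    = (pvPairs genres plays).foldl
        (fun d q => d.modify q.2.1 [] (fun v => v ++ [(q.2.2, q.1)])) PySem.Dict.empty :=
    pv_loop_pairs genres plays h
      (fun d q => d.modify q.2.1 [] (fun v => v ++ [(q.2.2, q.1)])) PySem.Dict.empty
  have hA2 : (PySem.List.pyRange 0 (PySem.List.len genres)).foldl
      (fun (d : PySem.Dict String Int) i =>
        d.modify (PySem.List.pyGetD genres i "") 0 (fun t => t + PySem.List.pyGetD plays i 0))
      PySem.Dict.empty
    = (pvPairs genres plays).foldl
        (fun d q => d.modify q.2.1 0 (fun t => t + q.2.2)) PySem.Dict.empty :=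
    pv_loop_pairs genres plays h
      (fun d q => d.modify q.2.1 0 (fun t => t + q.2.2)) PySem.Dict.empty
  rw [hA1, hA2]

-- ===== VERDICT (by name: the statement is the Claim_ definition above) =====
theorem solution_spec : Claim_equal_solution := by
  intro genres plays _ hpre
  unfold Pre_solution at hpre
  unfold Spec_solution solution solution_alt
  dsimp only
  rw [pv_loopA genres plays hpre]
  dsimp only
  have hP : pvPairs genres plays = PySem.List.enumerate (genres.zip plays) := rfl
  rw [← hP]
  -- characterise A's dictionaries
  have hnodup : (pvK (pvPairs genres plays)).Nodup := PySem.Set.nodup_ofList _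
  have hkeys_dic : ((pvPairs genres plays).foldl
      (fun d q => d.modify q.2.1 [] (fun v => v ++ [(q.2.2, q.1)])) PySem.Dict.empty).keys
      = pvK (pvPairs genres plays) :=
    pv_keys_modify_fold (fun q (v : List (Int × Int)) => v ++ [(q.2.2, q.1)]) []
      (pvPairs genres plays) PySem.Dict.empty
  have hkeys_max : ((pvPairs genres plays).foldl
      (fun d q => d.modify q.2.1 0 (fun t => t + q.2.2)) PySem.Dict.empty).keys
      = pvK (pvPairs genres plays) :=
    pv_keys_modify_fold (fun q (t : Int) => t + q.2.2) 0 (pvPairs genres plays) PySem.Dict.empty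
  have hgetd_max : ∀ g, ((pvPairs genres plays).foldl
      (fun d q => d.modify q.2.1 0 (fun t => t + q.2.2)) PySem.Dict.empty).getD g 0
      = pvT (pvPairs genres plays) g := by
    intro g
    have h := pv_getD_modify_sum (pvPairs genres plays) PySem.Dict.empty g
    simpa [pvT, pvL, List.map_map, Function.comp] using h
  have hitems_max : ((pvPairs genres plays).foldl
      (fun d q => d.modify q.2.1 0 (fun t => t + q.2.2)) PySem.Dict.empty).items
      = (pvK (pvPairs genres plays)).map (fun g => (g, pvT (pvPairs genres plays) g)) := by
    rw [pv_items_eq_keys_map _ 0 (by rw [hkeys_max]; exact hnodup), hkeys_max]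
    exact List.map_congr_left (fun g _ => by rw [hgetd_max g])
  have hd_dic2 : ∀ g ∈ pvK (pvPairs genres plays),
      (((pvPairs genres plays).foldl
          (fun d q => d.modify q.2.1 [] (fun v => v ++ [(q.2.2, q.1)])) PySem.Dict.empty).keys.foldl
        (fun d k => d.modify k [] (fun l => PySem.List.sorted l (fun x => -x.1) false))
        ((pvPairs genres plays).foldl
          (fun d q => d.modify q.2.1 [] (fun v => v ++ [(q.2.2, q.1)])) PySem.Dict.empty)).getD g []
      = PySem.List.sorted (pvL (pvPairs genres plays) g) (fun x => -x.1) false := by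
    intro g hg
    have hget : ((pvPairs genres plays).foldl
        (fun d q => d.modify q.2.1 [] (fun v => v ++ [(q.2.2, q.1)])) PySem.Dict.empty).getD g []
        = pvL (pvPairs genres plays) g := by
      simpa using pv_getD_modify_append (pvPairs genres plays) PySem.Dict.empty g
    rw [pv_dic2_getD _ _ _ g (by rw [hkeys_dic]; exact hnodup),
        if_pos (by rw [hkeys_dic]; exact hg), hget]
  -- characterise B's dictionary
  have hkeys_info : ((pvPairs genres plays).foldl altStep PySem.Dict.empty).keys
      = pvK (pvPairs genres plays) :=
    pv_keys_altStep_fold (pvPairs genres plays) PySem.Dict.empty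
  have hfst : ∀ g, (((pvPairs genres plays).foldl altStep PySem.Dict.empty).getD g (0, (0, 0), none)).1
      = pvT (pvPairs genres plays) g := by
    intro g
    rw [PySem.Dict.getD_eq_get?_getD, pv_get?_altStep_fold, PySem.Dict.get?_empty]
    cases hL : pvL (pvPairs genres plays) g with
    | nil => simp [pvT, hL]
    | cons x r => simp [hL, pv_fst_bstep, pvStart, pvT]
  have hget_info : ∀ g ∈ pvK (pvPairs genres plays), ∃ x r,
      pvL (pvPairs genres plays) g = x :: r ∧
      ((pvPairs genres plays).foldl altStep PySem.Dict.empty).getD g (0, (0, 0), none)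
        = r.foldl pvBstep (pvStart x) := by
    intro g hg
    obtain ⟨x, r, hL⟩ := pv_mem_K_ne_nil (pvPairs genres plays) g hg
    refine ⟨x, r, hL, ?_⟩
    rw [PySem.Dict.getD_eq_get?_getD, pv_get?_altStep_fold, PySem.Dict.get?_empty, hL]
    rfl
  have hitems_info : ((pvPairs genres plays).foldl altStep PySem.Dict.empty).items
      = (pvK (pvPairs genres plays)).map
          (fun g => (g, ((pvPairs genres plays).foldl altStep PySem.Dict.empty).getD g (0, (0, 0), none))) := by
    rw [pv_items_eq_keys_map _ (0, (0, 0), none) (by rw [hkeys_info]; exact hnodup), hkeys_info]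
  rw [pvA_canon (pvPairs genres plays) _ _ hitems_max hd_dic2,
      pvB_canon (pvPairs genres plays) _ hitems_info hfst hget_info]
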